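-- pv_equiv track=rewrite | github.com/Ahmedfetyan68/resume_reader | extract_information.py | postprocess_projects
-- ===== SOURCE A (Python) =====
-- def postprocess_projects(raw_projects):
--     """
--     Takes the list of lines from 'Projects' and returns a list of dictionaries.
--     E.g., from:
--       ["Projects", "Music Store Website", "* Built...", "Finance Program", "* Developed..."]
--     to:
--       [
--         {"Title": "Music Store Website", "Description": "Built..."},
--         {"Title": "Finance Program", "Description": "Developed..."},
--       ]
--
--     If a project doesn't have a matching description line, we store None or an empty string.
--     """
--     projects_clean = []
--     project_entries = []  # We'll build a list of dicts like [{"Title":..., "Description":...}]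
--
--     # 1) Filter out headings or empty lines
--     unwanted_headings = {"projects", "project"}  # can be lowercase for easy checking
--
--     for line in raw_projects:
--         line_stripped = line.strip()
--         if not line_stripped:
--             continue  # skip empty
--         # If it's exactly "Projects" or "projects", skip
--         if line_stripped.lower() in unwanted_headings:
--             continue
--         projects_clean.append(line_stripped)
--
--     # 2) Now parse out pairs (Title, Description)
--     # We'll assume a pattern:
--     #  - "Title line" does NOT start with "*"
--     #  - The next line (if any) that starts with "*" is its description
--     # For lines that don't follow this pattern, we keep them in Title but no description.
--
--     i = 0
--     while i < len(projects_clean):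
--         title_line = projects_clean[i]
--         title_line_clean = title_line.lstrip("*").strip()  # remove any leading asterisks/spaces
--         description_line = None
--
--         # Check if there is a next line starting with "*"
--         if i + 1 < len(projects_clean) and projects_clean[i+1].startswith("*"):
--             # next line is a description
--             desc = projects_clean[i+1].lstrip("*").strip()
--             description_line = desc
--             i += 2  # skip the next line because we used it
--         else:
--             i += 1  # just move on
--
--         project_entries.append({
--             "Title": title_line_clean,
--             "Description": description_line or ""
--         })
--
--     return project_entries
-- ===== SOURCE B (Python) =====
-- def postprocess_projects(raw_projects):
--     """Single forward pass: filter and pair titles with '*' descriptions in one loop."""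
--     entries = []
--     pending = None
--     for line in raw_projects:
--         s = line.strip()
--         if not s or s.lower() in ("projects", "project"):
--             continue
--         if pending is None:
--             pending = s.lstrip("*").strip()
--         elif s.startswith("*"):
--             entries.append({"Title": pending, "Description": s.lstrip("*").strip()})
--             pending = None
--         else:
--             entries.append({"Title": pending, "Description": ""})
--             pending = s.lstrip("*").strip()
--     if pending is not None:
--         entries.append({"Title": pending, "Description": ""})
--     return entries
-- ===== Notes on version B (the rewrite author's own statement) =====
-- stated objective: simpler
-- what changed: A first builds a filtered intermediate list and then runs an index-based while-loop that pairs each title with a possible following '*' line; B is a single forward pass that filters and pairs in the same loop using one 'pending title' variable, with no intermediate list and no index arithmetic.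
import Mathlib
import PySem

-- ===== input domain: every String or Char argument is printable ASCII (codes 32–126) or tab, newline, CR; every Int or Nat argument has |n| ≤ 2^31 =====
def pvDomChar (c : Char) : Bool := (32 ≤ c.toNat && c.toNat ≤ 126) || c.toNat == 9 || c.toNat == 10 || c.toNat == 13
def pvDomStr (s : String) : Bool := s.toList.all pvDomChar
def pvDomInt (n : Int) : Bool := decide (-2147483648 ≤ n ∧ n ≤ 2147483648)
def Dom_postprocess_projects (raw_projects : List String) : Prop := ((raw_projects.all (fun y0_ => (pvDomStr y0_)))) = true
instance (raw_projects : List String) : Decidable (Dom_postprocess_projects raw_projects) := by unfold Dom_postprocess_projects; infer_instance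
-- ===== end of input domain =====

-- B replaces A's two passes (filter pass, then an indexed pairing while-loop) by one forward
-- fold that filters and pairs in the same step (objective: simpler; same asymptotic cost).

-- s.lstrip("*"): exact hand port (drops exactly the leading '*' characters)
def pvLstripStar (s : String) : String := String.ofList (s.toList.dropWhile (· == '*'))

-- ===== PORT A =====
-- the Python set literal {"projects", "project"}
def pvUnwantedHeadings : PySem.Set String := PySem.Set.ofList ["projects", "project"]

-- loop 1: filter out empty lines and headings (list built by append, as in A)
def pvACleanLoop (raw_projects : List String) : List String :=
  raw_projects.foldl (fun acc line =>
    let line_stripped := PySem.Str.strip line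
    if line_stripped = "" then acc
    else if PySem.Set.contains pvUnwantedHeadings (PySem.Str.lower line_stripped) then acc
    else acc ++ [line_stripped]) []

-- loop 2: the while-loop over index i, consuming one or two lines per entry, as recursion on
-- the remaining lines.  'description_line or ""' is ported as the Option match (for a string
-- d, 'd or ""' is d when d ≠ "" and "" when d = "").
def pvAPairLoop : List String → List (List (String × String))
  | [] => []
  | title_line :: rest =>
    let title_line_clean := PySem.Str.strip (pvLstripStar title_line)
    match rest with
    | next :: rest' =>
      if PySem.Str.startswith next "*" then
        let description_line := some (PySem.Str.strip (pvLstripStar next))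
        [("Title", title_line_clean),
         ("Description", match description_line with
                         | none => ""
                         | some d => if d = "" then "" else d)] :: pvAPairLoop rest'
      else
        [("Title", title_line_clean), ("Description", "")] :: pvAPairLoop (next :: rest')
    | [] => [[("Title", title_line_clean), ("Description", "")]]
termination_by l => l.length
decreasing_by all_goals simp

def postprocess_projects (raw_projects : List String) : List (List (String × String)) :=
  pvAPairLoop (pvACleanLoop raw_projects)

-- ===== PORT B =====
def pvBEntry (title desc : String) : List (String × String) :=
  [("Title", title), ("Description", desc)]

-- one step of B's single pass: state = (entries so far, pending title)
def pvBStep (st : List (List (String × String)) × Option String) (line : String) :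
    List (List (String × String)) × Option String :=
  let s := PySem.Str.strip line
  if s = "" ∨ PySem.Str.lower s = "projects" ∨ PySem.Str.lower s = "project" then st
  else
    match st.2 with
    | none => (st.1, some (PySem.Str.strip (pvLstripStar s)))
    | some t =>
      if PySem.Str.startswith s "*" then
        (st.1 ++ [pvBEntry t (PySem.Str.strip (pvLstripStar s))], none)
      else
        (st.1 ++ [pvBEntry t ""], some (PySem.Str.strip (pvLstripStar s)))

def postprocess_projects_alt (raw_projects : List String) : List (List (String × String)) :=
  let st := raw_projects.foldl pvBStep ([], none)
  match st.2 with
  | none => st.1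
  | some t => st.1 ++ [pvBEntry t ""]

-- ===== PRECONDITION & SPEC =====
def Spec_postprocess_projects (raw_projects : List String) (out : List (List (String × String))) : Prop := out = postprocess_projects_alt raw_projects
instance (raw_projects : List String) (out : List (List (String × String))) : Decidable (Spec_postprocess_projects raw_projects out) := by unfold Spec_postprocess_projects; infer_instance

-- ===== CLAIM (what is proved, stated in full; the proofs are below) =====
def Claim_equal_postprocess_projects : Prop := ∀ (raw_projects : List String), Dom_postprocess_projects raw_projects → Spec_postprocess_projects raw_projects (postprocess_projects raw_projects)

-- ===== LEMMAS AND PROOFS =====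

-- A's filter, in cons form (proof-side characterisation of loop 1)
def pvCleanRec : List String → List String
  | [] => []
  | line :: rest =>
    let s := PySem.Str.strip line
    if s = "" then pvCleanRec rest
    else if PySem.Set.contains pvUnwantedHeadings (PySem.Str.lower s) then pvCleanRec rest
    else s :: pvCleanRec rest

-- A's pairing continued from a pending (already-cleaned) title
def pvPairPending (t : String) : List String → List (List (String × String))
  | [] => [pvBEntry t ""]
  | d :: rest =>
    if PySem.Str.startswith d "*" then
      pvBEntry t (PySem.Str.strip (pvLstripStar d)) :: pvAPairLoop rest
    else
      pvBEntry t "" :: pvPairPending (PySem.Str.strip (pvLstripStar d)) rest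

def pvFinalize (st : List (List (String × String)) × Option String) :
    List (List (String × String)) :=
  match st.2 with
  | none => st.1
  | some t => st.1 ++ [pvBEntry t ""]

lemma pvMem_unwanted (x : String) :
    x ∈ pvUnwantedHeadings ↔ (x = "projects" ∨ x = "project") := by
  have h : pvUnwantedHeadings = ["projects", "project"] := by decide
  rw [h]; simp

lemma pvACleanLoop_go (raw : List String) (acc : List String) :
    raw.foldl (fun acc line =>
      let line_stripped := PySem.Str.strip line
      if line_stripped = "" then acc
      else if PySem.Set.contains pvUnwantedHeadings (PySem.Str.lower line_stripped) then acc
      else acc ++ [line_stripped]) acc = acc ++ pvCleanRec raw := by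
  induction raw generalizing acc with
  | nil => simp [pvCleanRec]
  | cons line rest ih =>
    rw [List.foldl_cons, ih]
    simp only [pvCleanRec]
    by_cases h1 : PySem.Str.strip line = ""
    · simp [h1]
    · by_cases hm : PySem.Str.lower (PySem.Str.strip line) ∈ pvUnwantedHeadings
      · simp [h1, hm]
      · simp [h1, hm]

lemma pvACleanLoop_eq (raw : List String) : pvACleanLoop raw = pvCleanRec raw := by
  unfold pvACleanLoop
  rw [pvACleanLoop_go]
  simp

-- A's pairing loop, restarted after a title line, equals pairing from that pending title
lemma pvAPair_cons (l : List String) : ∀ t : String,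
    pvAPairLoop (t :: l) = pvPairPending (PySem.Str.strip (pvLstripStar t)) l := by
  induction l with
  | nil => intro t; simp [pvAPairLoop, pvPairPending, pvBEntry]
  | cons d rest ih =>
    intro t
    by_cases h : PySem.Chars.startswith d.toList ['*'] = true
    · by_cases hd : PySem.Str.strip (pvLstripStar d) = "" <;>
        simp [pvAPairLoop, pvPairPending, pvBEntry, h, hd]
    · simp [pvAPairLoop, pvPairPending, pvBEntry, h, ih d]

-- the single-pass invariant: B's fold from any state computes A's pairing of the cleaned rest
lemma pvB_invariant (raw : List String) :
    ∀ (acc : List (List (String × String))) (pending : Option String),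
    pvFinalize (raw.foldl pvBStep (acc, pending)) =
      acc ++ (match pending with
              | none => pvAPairLoop (pvCleanRec raw)
              | some t => pvPairPending t (pvCleanRec raw)) := by
  induction raw with
  | nil =>
    intro acc pending
    cases pending <;> simp [pvFinalize, pvCleanRec, pvAPairLoop, pvPairPending]
  | cons line rest ih =>
    intro acc pending
    rw [List.foldl_cons]
    simp only [pvCleanRec]
    by_cases h1 : PySem.Str.strip line = ""
    · cases pending <;> simp [pvBStep, h1, ih]
    · by_cases h2 : PySem.Str.lower (PySem.Str.strip line) = "projects" ∨
          PySem.Str.lower (PySem.Str.strip line) = "project"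
      · have hm : PySem.Str.lower (PySem.Str.strip line) ∈ pvUnwantedHeadings :=
          (pvMem_unwanted _).mpr h2
        cases pending <;> rcases h2 with h2 | h2 <;> simp [pvBStep, h1, h2, pvMem_unwanted, ih]
      · have hm : PySem.Str.lower (PySem.Str.strip line) ∉ pvUnwantedHeadings := by
          intro hcon; exact h2 ((pvMem_unwanted _).mp hcon)
        rw [not_or] at h2
        cases pending with
        | none =>
          simp [pvBStep, h1, h2.1, h2.2, hm, ih, pvAPair_cons]
        | some t =>
          by_cases hstar : PySem.Chars.startswith (PySem.Chars.strip line.toList) ['*'] = true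
          · simp [pvBStep, h1, h2.1, h2.2, hm, hstar, ih, pvPairPending]
          · simp [pvBStep, h1, h2.1, h2.2, hm, hstar, ih, pvPairPending]

-- ===== VERDICT (by name: the statement is the Claim_ definition above) =====
theorem postprocess_projects_spec : Claim_equal_postprocess_projects := by
  intro raw _
  unfold Spec_postprocess_projects postprocess_projects postprocess_projects_alt
  have h := pvB_invariant raw [] none
  simpa [pvFinalize, pvACleanLoop_eq] using h.symm
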